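-- pv_equiv track=rewrite | github.com/olga-bessonova/blind75 | frequent_letters/frequent_letters6.py | frequent_letters
-- ===== SOURCE A (Python) =====
-- def frequent_letters(string):
--   hash = {}
--   for i in range(len(string)):
--     if string[i] in hash:
--       hash[string[i]] += 1
--     else:
--       hash[string[i]] = 1
--   return [x  for x in hash if hash[x] > 2]
-- ===== SOURCE B (Python) =====
-- def frequent_letters(string):
--   chars = list(string)
--   result = []
--   while chars:
--     c = chars[0]
--     if chars.count(c) > 2:
--       result.append(c)
--     chars = [x for x in chars[1:] if x != c]
--   return result
-- ===== Notes on version B (the rewrite author's own statement) =====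
-- stated objective: alternative
-- what changed: The frequency dictionary is replaced by an extract-and-remove loop over a shrinking worklist: repeatedly take the first remaining character, count it among the remaining characters (counts are intact because processed characters were removed wholesale), emit it if the count exceeds 2, and delete all of its occurrences; no hash table and no first-occurrence test are needed.
import Mathlib
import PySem

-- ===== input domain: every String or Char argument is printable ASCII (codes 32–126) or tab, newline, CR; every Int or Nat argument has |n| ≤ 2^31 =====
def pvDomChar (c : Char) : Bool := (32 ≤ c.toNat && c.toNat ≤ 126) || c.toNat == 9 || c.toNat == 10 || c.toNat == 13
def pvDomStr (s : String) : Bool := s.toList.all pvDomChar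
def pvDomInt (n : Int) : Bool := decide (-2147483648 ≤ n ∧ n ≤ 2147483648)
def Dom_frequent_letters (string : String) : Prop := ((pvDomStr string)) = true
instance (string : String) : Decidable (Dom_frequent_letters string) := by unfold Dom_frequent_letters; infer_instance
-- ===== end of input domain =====

-- B replaces A's frequency dictionary with an extract-and-remove loop over a shrinking
-- worklist (take the first remaining character, count it, delete all its occurrences);
-- same return value, a genuinely different traversal, not faster.


-- ===== PORT A =====
-- Python iterates i over range(len(string)) reading string[i]; ported as the fold over the
-- character list. Keys are the characters; the comprehension's 1-char strings are rebuilt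
-- at the end with String.mk [c] (exact: every key is a single character).
def frequent_letters (string : String) : List String :=
  let cs := string.toList
  let h := cs.foldl
    (fun d c => if d.contains c then d.modify c 0 (· + 1) else d.insert c 1)
    (PySem.Dict.empty : PySem.Dict Char Int)
  (h.keys.filter (fun x => decide (h.getD x 0 > 2))).map (fun c => String.mk [c])

-- ===== PORT B =====
-- B's while loop over the shrinking list `chars`, ported as the corresponding recursion:
-- head c, count it in the whole remaining list, drop every occurrence, recurse.
def flGo (chars : List Char) : List String :=
  match chars with
  | [] => []
  | c :: rest0 =>
      (if chars.count c > 2 then [String.mk [c]] else []) ++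
        flGo (rest0.filter (fun x => x != c))
termination_by chars.length
decreasing_by
  simp only [List.length_cons, List.length_unattach]
  exact Nat.lt_succ_of_le (le_trans (List.length_filter_le _ _) (by simp))

def frequent_letters_alt (string : String) : List String :=
  flGo string.toList

-- ===== PRECONDITION & SPEC =====
def Spec_frequent_letters (string : String) (out : List String) : Prop := out = frequent_letters_alt string
instance (string : String) (out : List String) : Decidable (Spec_frequent_letters string out) := by unfold Spec_frequent_letters; infer_instance

-- ===== CLAIM (what is proved, stated in full; the proofs are below) =====
def Claim_equal_frequent_letters : Prop := ∀ (string : String), Dom_frequent_letters string → Spec_frequent_letters string (frequent_letters string)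

-- ===== LEMMAS AND PROOFS =====

-- A's loop body is Counter's loop body: when the key is absent, insert k 1 IS modify k 0 (+1).
theorem fl_step_eq (d : PySem.Dict Char Int) (c : Char) :
    (if d.contains c then d.modify c 0 (· + 1) else d.insert c 1) = d.modify c 0 (· + 1) := by
  by_cases h : d.contains c
  · simp [h]
  · simp at h
    simp [PySem.Dict.insert, PySem.Dict.modify, h, PySem.Dict.getD_of_not_contains _ _ h]

theorem fl_fold_eq (cs : List Char) :
    cs.foldl (fun d c => if d.contains c then d.modify c 0 (· + 1) else d.insert c 1)
      (PySem.Dict.empty : PySem.Dict Char Int) = PySem.Dict.counter cs := by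
  rw [PySem.Dict.counter_eq_foldl]
  simp only [fl_step_eq]

-- The first occurrences of cs that are not already in `seen`, in order.
def firstOccs {α : Type} [BEq α] (seen : PySem.Set α) : List α → List α
  | [] => []
  | c :: cs =>
      if PySem.Set.contains seen c then firstOccs (PySem.Set.add seen c) cs
      else c :: firstOccs (PySem.Set.add seen c) cs

theorem fl_update_eq {α : Type} [BEq α] (cs : List α) (seen : PySem.Set α) :
    PySem.Set.update seen cs = seen ++ firstOccs seen cs := by
  induction cs generalizing seen with
  | nil => simp [PySem.Set.update, firstOccs]
  | cons c cs ih =>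
    have hupd : PySem.Set.update seen (c :: cs) = PySem.Set.update (PySem.Set.add seen c) cs := rfl
    rw [hupd, ih]
    by_cases h : PySem.Set.contains seen c = true
    · have ha : PySem.Set.add seen c = seen := by
        unfold PySem.Set.add; exact if_pos h
      rw [ha]
      simp only [firstOccs, if_pos h, ha]
    · have ha : PySem.Set.add seen c = seen ++ [c] := by
        unfold PySem.Set.add; exact if_neg h
      rw [ha]
      simp only [firstOccs, if_neg h, ha, List.append_assoc, List.singleton_append]

-- firstOccs only inspects `seen` through membership of elements of the list.
theorem fl_firstOccs_congr {α : Type} [BEq α] (l : List α) (s t : PySem.Set α)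
    (h : ∀ x ∈ l, PySem.Set.contains s x = PySem.Set.contains t x) :
    firstOccs s l = firstOccs t l := by
  induction l generalizing s t with
  | nil => rfl
  | cons d l ih =>
    have hd : PySem.Set.contains s d = PySem.Set.contains t d := h d (by simp)
    have hadd : ∀ x ∈ l,
        PySem.Set.contains (PySem.Set.add s d) x = PySem.Set.contains (PySem.Set.add t d) x := by
      intro x hx
      have hx' := h x (by simp [hx])
      unfold PySem.Set.add PySem.Set.contains at *
      by_cases hsd : List.contains s d
      · rw [hsd] at hd
        simp [hsd, ← hd, hx']
      · simp only [Bool.not_eq_true] at hsd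
        rw [hsd] at hd
        simp [hsd, ← hd, hx']
    simp only [firstOccs, hd, ih _ _ hadd]

-- Elements already seen may be dropped from the update list.
theorem fl_update_filter {α : Type} [BEq α] [LawfulBEq α] (cs : List α) (s : PySem.Set α)
    (c : α) (h : PySem.Set.contains s c = true) :
    PySem.Set.update s cs = PySem.Set.update s (cs.filter (fun x => x != c)) := by
  induction cs generalizing s with
  | nil => rfl
  | cons d cs ih =>
    by_cases hdc : d = c
    · subst hdc
      have ha : PySem.Set.add s d = s := by
        unfold PySem.Set.add; exact if_pos h
      have hupd : PySem.Set.update s (d :: cs) = PySem.Set.update (PySem.Set.add s d) cs := rfl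
      rw [hupd, ha, ih s h]
      simp
    · have hupd : PySem.Set.update s (d :: cs) = PySem.Set.update (PySem.Set.add s d) cs := rfl
      have hfil : (d :: cs).filter (fun x => x != c) = d :: cs.filter (fun x => x != c) := by
        simp [hdc]
      have hc' : PySem.Set.contains (PySem.Set.add s d) c = true := by
        unfold PySem.Set.add PySem.Set.contains at *
        simp only [List.contains_iff_mem] at h ⊢
        split <;> simp [h]
      rw [hupd, hfil, ih _ hc']
      rfl

-- Key structural fact: first-occurrence dedup of c :: cs is c followed by the dedup of cs
-- with every occurrence of c removed.
theorem fl_ofList_cons {α : Type} [BEq α] [LawfulBEq α] (c : α) (cs : List α) :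
    PySem.Set.ofList (c :: cs) = c :: PySem.Set.ofList (cs.filter (fun x => x != c)) := by
  have h1 : PySem.Set.ofList (c :: cs) = PySem.Set.update [c] cs := by
    have : PySem.Set.ofList (c :: cs)
        = PySem.Set.update (PySem.Set.add PySem.Set.empty c) cs := rfl
    rw [this]
    have : PySem.Set.add PySem.Set.empty c = [c] := by
      unfold PySem.Set.add PySem.Set.empty PySem.Set.contains
      simp
    rw [this]
  have hc : PySem.Set.contains [c] c = true := by
    unfold PySem.Set.contains; simp
  rw [h1, fl_update_filter cs [c] c hc, fl_update_eq]
  have hcong : firstOccs [c] (cs.filter (fun x => x != c))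
      = firstOccs PySem.Set.empty (cs.filter (fun x => x != c)) := by
    apply fl_firstOccs_congr
    intro x hx
    have hxc : (x == c) = false := by
      have := List.of_mem_filter hx
      simpa using this
    unfold PySem.Set.contains PySem.Set.empty
    simp [hxc]
  rw [hcong]
  have h2 : PySem.Set.ofList (cs.filter (fun x => x != c))
      = firstOccs PySem.Set.empty (cs.filter (fun x => x != c)) := by
    have : PySem.Set.ofList (cs.filter (fun x => x != c))
        = PySem.Set.update PySem.Set.empty (cs.filter (fun x => x != c)) := rfl
    rw [this, fl_update_eq]
    rfl
  rw [h2]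
  rfl

-- B's recursion computes exactly "first-occurrence dedup, filtered by total count > 2".
theorem flGo_eq (cs : List Char) :
    flGo cs = ((PySem.Set.ofList cs).filter (fun x => decide (cs.count x > 2))).map
      (fun c => String.mk [c]) := by
  induction hn : cs.length using Nat.strong_induction_on generalizing cs with
  | _ n ih =>
    match cs, hn with
    | [], _ => rw [flGo.eq_def]; rfl
    | c :: cs, hn =>
      have hlt : (cs.filter (fun x => x != c)).length < n := by
        subst hn
        simp only [List.length_cons]
        exact Nat.lt_succ_of_le (List.length_filter_le _ _)
      have hIH := ih _ hlt (cs.filter (fun x => x != c)) rfl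
      have hstep : flGo (c :: cs)
          = (if (c :: cs).count c > 2 then [String.mk [c]] else []) ++
              flGo (cs.filter (fun x => x != c)) := by
        rw [flGo.eq_def]
      rw [hstep, hIH, fl_ofList_cons]
      simp only [List.filter_cons]
      -- rewrite the count predicate on the filtered tail's dedup to the full-list count
      have hcong : ∀ x ∈ PySem.Set.ofList (cs.filter (fun y => y != c)),
          decide ((cs.filter (fun y => y != c)).count x > 2)
            = decide ((c :: cs).count x > 2) := by
        intro x hx
        have hxmem : x ∈ cs.filter (fun y => y != c) := (PySem.Set.mem_ofList _ _).mp hx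
        have hxc : (x == c) = false := by
          have := List.of_mem_filter hxmem
          simpa using this
        have hxc' : x ≠ c := by simpa using hxc
        have h1 : (cs.filter (fun y => y != c)).count x = cs.count x :=
          List.count_filter (by simp [hxc'])
        have h2 : (c :: cs).count x = cs.count x := by
          rw [List.count_cons]
          simp [hxc, hxc', Ne.symm hxc']
        rw [h1, h2]
      rw [List.filter_congr hcong]
      by_cases hq : 2 ≤ cs.count c
      · simp [List.count_cons, hq]
      · simp [List.count_cons, hq]

-- ===== VERDICT (by name: the statement is the Claim_ definition above) =====
theorem frequent_letters_spec : Claim_equal_frequent_letters := by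
  intro string _
  unfold Spec_frequent_letters
  simp only [frequent_letters, frequent_letters_alt]
  rw [fl_fold_eq, flGo_eq, PySem.Dict.keys_counter]
  congr 1
  apply List.filter_congr
  intro x _
  rw [PySem.Dict.getD_counter]
  simp only [decide_eq_decide]
  omega
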